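-- pv_equiv track=rewrite | github.com/Vincent5201/BERT-for-GO-prediction | myDatasets.py | stepbystep
-- ===== SOURCE A (Python) =====
-- def stepbystep(game, min_move=None, max_move=None):
--     num_moves = len(game)
--     if min_move is None and max_move is None:
--         rgames = [[game[j] if j <= i else 0 for j in range(num_moves)] for i in range(num_moves)]
--     elif min_move is None:
--         rgames = [[game[j] if j <= i else 0 for j in range(num_moves)] for i in range(max_move)]
--     elif max_move is None:
--         rgames = [[game[j] if j <= i else 0 for j in range(num_moves)] for i in range(min_move, num_moves)]
--     else:
--         rgames = [[game[j] if j <= i else 0 for j in range(num_moves)] for i in range(min_move, max_move)]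
--     return rgames
-- ===== SOURCE B (Python) =====
-- def stepbystep(game, min_move=None, max_move=None):
--     n = len(game)
--     start = 0 if min_move is None else min_move
--     stop = n if max_move is None else max_move
--     k = max(0, min(start, n))
--     row = game[:k] + [0] * (n - k)
--     res = []
--     for i in range(start, stop):
--         if 0 <= i < n:
--             row[i] = game[i]
--         res.append(list(row))
--     return res
-- ===== Notes on version B (the rewrite author's own statement) =====
-- stated objective: alternative
-- what changed: B maintains one running prefix row (primed by a slice copy up to start), updates a single cell and snapshots a copy per step, instead of independently rebuilding every row with a per-element conditional comprehension.
import Mathlib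
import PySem

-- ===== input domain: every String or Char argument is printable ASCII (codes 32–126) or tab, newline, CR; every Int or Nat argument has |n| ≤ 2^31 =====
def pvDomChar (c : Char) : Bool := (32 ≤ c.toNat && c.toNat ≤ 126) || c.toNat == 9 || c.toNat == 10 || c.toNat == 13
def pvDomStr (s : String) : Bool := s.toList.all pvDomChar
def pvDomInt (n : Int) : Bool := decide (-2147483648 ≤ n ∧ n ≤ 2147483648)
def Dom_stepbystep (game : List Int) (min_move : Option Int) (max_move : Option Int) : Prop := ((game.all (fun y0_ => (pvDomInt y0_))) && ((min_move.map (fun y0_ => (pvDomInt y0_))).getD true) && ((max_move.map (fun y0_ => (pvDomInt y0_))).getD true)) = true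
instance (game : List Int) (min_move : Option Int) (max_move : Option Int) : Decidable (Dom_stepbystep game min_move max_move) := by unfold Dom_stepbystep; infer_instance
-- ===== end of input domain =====

-- B maintains one running prefix row (primed by a slice copy), updating one cell and snapshotting
-- a copy per step, instead of rebuilding every row with a per-element conditional.

-- ===== PORT A =====
-- the inner comprehension [game[j] if j <= i else 0 for j in range(num_moves)], identical in all four branches
def stepbystep (game : List Int) (min_move : Option Int) (max_move : Option Int) : List (List Int) :=
  let num_moves : Int := (game.length : Int)
  let rowFor : Int → List Int := fun i =>
    (PySem.List.pyRange 0 num_moves 1).map (fun j => if j ≤ i then PySem.List.pyGetD game j 0 else 0)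
  match min_move, max_move with
  | none, none => (PySem.List.pyRange 0 num_moves 1).map rowFor
  | none, some mx => (PySem.List.pyRange 0 mx 1).map rowFor
  | some mn, none => (PySem.List.pyRange mn num_moves 1).map rowFor
  | some mn, some mx => (PySem.List.pyRange mn mx 1).map rowFor

-- ===== PORT B =====
def stepbystep_alt (game : List Int) (min_move : Option Int) (max_move : Option Int) : List (List Int) :=
  let n : Int := (game.length : Int)
  let start : Int := match min_move with | none => 0 | some m => m
  let stop : Int := match max_move with | none => n | some m => m
  let k : Int := max 0 (min start n)
  let row1 : List Int := PySem.List.slice game none (some k) ++ List.replicate (game.length - k.toNat) 0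
  let st := (PySem.List.pyRange start stop 1).foldl
    (fun (st : List Int × List (List Int)) i =>
      let row := if 0 ≤ i ∧ i < n then PySem.List.pySetD st.1 i (PySem.List.pyGetD game i 0) else st.1
      (row, st.2 ++ [row])) (row1, ([] : List (List Int)))
  st.2

-- ===== PRECONDITION & SPEC =====
def Spec_stepbystep (game : List Int) (min_move : Option Int) (max_move : Option Int) (out : List (List Int)) : Prop := out = stepbystep_alt game min_move max_move
instance (game : List Int) (min_move : Option Int) (max_move : Option Int) (out : List (List Int)) : Decidable (Spec_stepbystep game min_move max_move out) := by unfold Spec_stepbystep; infer_instance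

-- ===== CLAIM (what is proved, stated in full; the proofs are below) =====
def Claim_equal_stepbystep : Prop := ∀ (game : List Int) (min_move : Option Int) (max_move : Option Int), Dom_stepbystep game min_move max_move → Spec_stepbystep game min_move max_move (stepbystep game min_move max_move)

-- ===== LEMMAS AND PROOFS =====

-- the running prefix row with all cells 0 ≤ j < s filled in
def Qrow (game : List Int) (s : Int) : List Int :=
  (PySem.List.pyRange 0 (game.length : Int) 1).map (fun j => if j < s then PySem.List.pyGetD game j 0 else 0)

theorem Qrow_congr (game : List Int) (s t : Int)
    (h : ∀ j : Int, 0 ≤ j → j < (game.length : Int) → (j < s ↔ j < t)) :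
    Qrow game s = Qrow game t := by
  unfold Qrow
  apply List.map_congr_left
  intro j hj
  rw [PySem.List.mem_pyRange_one] at hj
  have := h j hj.1 hj.2
  by_cases hs : j < s
  · rw [if_pos hs, if_pos (this.mp hs)]
  · rw [if_neg hs, if_neg (fun ht => hs (this.mpr ht))]

theorem set_map_range {α : Type} (f : Nat → α) (m : Nat) (v : α) (N : Nat) :
    ((List.range N).map f).set m v
      = (List.range N).map (fun k => if k = m then v else f k) := by
  apply List.ext_getElem
  · simp
  · intro k h1 h2
    simp only [List.getElem_set, List.getElem_map, List.getElem_range]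
    by_cases hk : m = k
    · subst hk
      simp
    · rw [if_neg hk, if_neg (fun h => hk h.symm)]

theorem Qrow_set (game : List Int) (i : Int) (h0 : 0 ≤ i) (_hn : i < (game.length : Int)) :
    PySem.List.pySetD (Qrow game i) i (PySem.List.pyGetD game i 0) = Qrow game (i + 1) := by
  rw [PySem.List.pySetD_of_nonneg _ _ h0]
  unfold Qrow
  rw [PySem.List.pyRange_one]
  simp only [sub_zero, Int.toNat_natCast, List.map_map]
  rw [set_map_range]
  apply List.map_congr_left
  intro k hk
  simp only [Function.comp, zero_add]
  simp at hk
  by_cases he : k = i.toNat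
  · have h1 : (k : Int) = i := by omega
    rw [if_pos he, if_pos (by omega : (k : Int) < i + 1), h1]
  · rw [if_neg he]
    by_cases hlt : (k : Int) < i
    · rw [if_pos hlt, if_pos (by omega : (k : Int) < i + 1)]
    · rw [if_neg hlt, if_neg (by omega : ¬ ((k : Int) < i + 1))]

-- one step of B's main loop turns Qrow i into Qrow (i+1)
theorem Qrow_step (game : List Int) (i : Int) :
    (if 0 ≤ i ∧ i < (game.length : Int) then
        PySem.List.pySetD (Qrow game i) i (PySem.List.pyGetD game i 0)
      else Qrow game i) = Qrow game (i + 1) := by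
  split_ifs with h
  · exact Qrow_set game i h.1 h.2
  · apply Qrow_congr
    intro j hj hjn
    omega

-- the primed row (a copied prefix padded with zeros) is the running row filled below k
theorem take_append_replicate_eq_Qrow (game : List Int) (k : Int) (h0 : 0 ≤ k)
    (hk : k ≤ (game.length : Int)) :
    game.take k.toNat ++ List.replicate (game.length - k.toNat) 0 = Qrow game k := by
  unfold Qrow
  rw [PySem.List.pyRange_one]
  simp only [sub_zero, Int.toNat_natCast, List.map_map]
  apply List.ext_getElem
  · simp
    omega
  · intro j h1 h2
    simp only [List.getElem_map, List.getElem_range, Function.comp, zero_add]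
    by_cases hj : j < k.toNat
    · rw [List.getElem_append_left (by simp; omega)]
      rw [List.getElem_take]
      rw [if_pos (by omega : ((j : Nat) : Int) < k)]
      rw [PySem.List.pyGetD_eq_getElem _ _ (by omega) (by omega)]
      simp
    · rw [List.getElem_append_right (by simp; omega)]
      rw [if_neg (by omega : ¬ ((j : Nat) : Int) < k)]
      simp

theorem main_loop (game : List Int) (b : Int) : ∀ (a : Int) (acc : List (List Int)),
    ((PySem.List.pyRange a b 1).foldl
      (fun (st : List Int × List (List Int)) i =>
        let row := if 0 ≤ i ∧ i < (game.length : Int) then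
            PySem.List.pySetD st.1 i (PySem.List.pyGetD game i 0) else st.1
        (row, st.2 ++ [row]))
      (Qrow game a, acc)).2
    = acc ++ (PySem.List.pyRange a b 1).map (fun k => Qrow game (k + 1)) := by
  have H : ∀ (fuel : Nat) (a : Int) (acc : List (List Int)), (b - a).toNat ≤ fuel →
      ((PySem.List.pyRange a b 1).foldl
        (fun (st : List Int × List (List Int)) i =>
          let row := if 0 ≤ i ∧ i < (game.length : Int) then
              PySem.List.pySetD st.1 i (PySem.List.pyGetD game i 0) else st.1
          (row, st.2 ++ [row]))
        (Qrow game a, acc)).2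
      = acc ++ (PySem.List.pyRange a b 1).map (fun k => Qrow game (k + 1)) := by
    intro fuel
    induction fuel with
    | zero =>
      intro a acc hf
      rw [PySem.List.pyRange_one_eq_nil (by omega)]
      simp
    | succ m ih =>
      intro a acc hf
      by_cases hab : a < b
      · rw [PySem.List.pyRange_one_cons hab]
        simp only [List.foldl_cons, List.map_cons]
        rw [Qrow_step game a]
        rw [ih (a + 1) (acc ++ [Qrow game (a + 1)]) (by omega)]
        simp
      · rw [PySem.List.pyRange_one_eq_nil (by omega)]
        simp
  exact fun a acc => H (b - a).toNat a acc le_rfl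

-- A's row for step i is the running row filled up to i inclusive
theorem rowFor_eq_Qrow (game : List Int) (i : Int) :
    (PySem.List.pyRange 0 (game.length : Int) 1).map
      (fun j => if j ≤ i then PySem.List.pyGetD game j 0 else 0) = Qrow game (i + 1) := by
  unfold Qrow
  apply List.map_congr_left
  intro j _
  by_cases h : j ≤ i
  · rw [if_pos h, if_pos (by omega : j < i + 1)]
  · rw [if_neg h, if_neg (by omega : ¬ j < i + 1)]

-- B's whole computation equals mapping A's row over range(start, stop)
theorem alt_eq (game : List Int) (min_move max_move : Option Int) :
    stepbystep_alt game min_move max_move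
      = (PySem.List.pyRange (match min_move with | none => 0 | some m => m)
          (match max_move with | none => (game.length : Int) | some m => m) 1).map
          (fun k => Qrow game (k + 1)) := by
  unfold stepbystep_alt
  simp only []
  set start : Int := match min_move with | none => 0 | some m => m with hstart
  set stop : Int := match max_move with | none => (game.length : Int) | some m => m with hstop
  have hrow1 : PySem.List.slice game none (some (max 0 (min start (game.length : Int))))
      ++ List.replicate (game.length - (max 0 (min start (game.length : Int))).toNat) 0
      = Qrow game start := by
    rw [PySem.List.slice_to _ (by omega)]
    rw [take_append_replicate_eq_Qrow game _ (by omega) (by omega)]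
    exact Qrow_congr game _ start (by intro j hj hjn; omega)
  rw [hrow1]
  exact main_loop game stop start []

-- ===== VERDICT (by name: the statement is the Claim_ definition above) =====
theorem stepbystep_spec : Claim_equal_stepbystep := by
  intro game min_move max_move _
  unfold Spec_stepbystep
  rw [alt_eq]
  unfold stepbystep
  simp only []
  have hrw : ∀ L : List Int,
      L.map (fun i => (PySem.List.pyRange 0 (game.length : Int) 1).map
        (fun j => if j ≤ i then PySem.List.pyGetD game j 0 else 0))
      = L.map (fun k => Qrow game (k + 1)) := by
    intro L
    apply List.map_congr_left
    intro i _
    exact rowFor_eq_Qrow game i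
  match min_move, max_move with
  | none, none => exact hrw _
  | none, some mx => exact hrw _
  | some mn, none => exact hrw _
  | some mn, some mx => exact hrw _
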